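-- pv_equiv track=rewrite | github.com/timng0/cs141-w25 | lec13.py | locate_all_words
-- ===== SOURCE A (Python) =====
-- def locate_all_words(words):
--     """
--     Locate the occurrences of each word in the list
--
--     Input:
--         words (list[str]): list of words
--
--     Output (dict[str,list[int]]): dictionary that maps a string to
--         the locations where it appears in the list
--     """
--     locations = {}
--     for i, word in enumerate(words):
--         if word not in locations:
--             locations[word] = [i]
--         else:
--             locations[word].append(i)
--     return locations
-- ===== SOURCE B (Python) =====
-- def locate_all_words(words):
--     """
--     Locate the occurrences of each word in the list (per-word scan version).
--
--     For each distinct word (in first-occurrence order, via dict.fromkeys),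
--     collect all its indices with a fresh enumerate scan.
--     """
--     return {w: [i for i, x in enumerate(words) if x == w]
--             for w in dict.fromkeys(words)}
-- ===== Notes on version B (the rewrite author's own statement) =====
-- stated objective: alternative
-- what changed: Replaces A's single incremental dict-building pass (insert-or-append per element) with a dict comprehension over the distinct words (dict.fromkeys), each distinct word collecting its index list by its own enumerate-and-filter scan.
import Mathlib
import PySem

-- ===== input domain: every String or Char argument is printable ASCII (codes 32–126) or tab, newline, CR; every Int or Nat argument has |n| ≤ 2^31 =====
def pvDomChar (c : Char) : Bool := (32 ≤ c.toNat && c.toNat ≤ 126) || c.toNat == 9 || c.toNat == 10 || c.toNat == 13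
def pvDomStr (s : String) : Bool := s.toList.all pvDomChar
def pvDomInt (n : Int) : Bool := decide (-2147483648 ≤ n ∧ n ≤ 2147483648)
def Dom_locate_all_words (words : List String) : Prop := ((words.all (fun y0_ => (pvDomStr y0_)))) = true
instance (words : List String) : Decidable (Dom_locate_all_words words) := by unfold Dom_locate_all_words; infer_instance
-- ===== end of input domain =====

-- B replaces A's single incremental dict-building pass with a map over the distinct words
-- (dict.fromkeys order), each word collecting its indices by its own enumerate-filter scan (alternative decomposition).


-- ===== PORT A =====
-- for i, word in enumerate(words): if word not in locations: locations[word] = [i] else: locations[word].append(i)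
def locate_all_words (words : List String) : List (String × List Int) :=
  ((PySem.List.enumerate words).foldl
    (fun d (p : Int × String) =>
      if d.contains p.2 = false then d.insert p.2 [p.1]
      else d.modify p.2 [] (fun l => l ++ [p.1]))
    PySem.Dict.empty).items

-- ===== PORT B =====
-- {w: [i for i, x in enumerate(words) if x == w] for w in dict.fromkeys(words)}
def locate_all_words_alt (words : List String) : List (String × List Int) :=
  (PySem.List.dedup words).map (fun w =>
    (w, ((PySem.List.enumerate words).filter (fun p => p.2 == w)).map (fun p => p.1)))

-- ===== PRECONDITION & SPEC =====
def Spec_locate_all_words (words : List String) (out : List (String × List Int)) : Prop := out = locate_all_words_alt words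
instance (words : List String) (out : List (String × List Int)) : Decidable (Spec_locate_all_words words out) := by unfold Spec_locate_all_words; infer_instance

-- ===== CLAIM (what is proved, stated in full; the proofs are below) =====
def Claim_equal_locate_all_words : Prop := ∀ (words : List String), Dom_locate_all_words words → Spec_locate_all_words words (locate_all_words words)

-- ===== LEMMAS AND PROOFS =====

-- A's insert-or-append step is exactly Dict.modify with default [] (modify on a fresh key appends the entry)
theorem locate_step_eq_modify (d : PySem.Dict String (List Int)) (p : Int × String) :
    (if d.contains p.2 = false then d.insert p.2 [p.1]
     else d.modify p.2 [] (fun l => l ++ [p.1]))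
    = d.modify p.2 [] (fun l => l ++ [p.1]) := by
  by_cases h : d.contains p.2
  · simp [h]
  · simp [h, PySem.Dict.modify,
      PySem.Dict.getD_of_not_contains d ([] : List Int) (by simpa using h)]

theorem locate_all_words_eq_alt (words : List String) :
    locate_all_words words = locate_all_words_alt words := by
  unfold locate_all_words locate_all_words_alt
  rw [PySem.List.foldl_congr_mem _ _ _ _ (fun acc x _ => locate_step_eq_modify acc x)]
  have hnd : ((PySem.List.enumerate words).foldl
      (fun d (p : Int × String) => d.modify p.2 [] (fun l => l ++ [p.1])) PySem.Dict.empty).keys.Nodup :=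
    PySem.Dict.nodup_keys_foldl_modify_key (PySem.List.enumerate words)
      (fun (p : Int × String) => p.2) [] (fun _ p l => l ++ [p.1]) PySem.Dict.empty (by simp)
  rw [PySem.Dict.items_eq_map_keys _ hnd []]
  have hkeys : ((PySem.List.enumerate words).foldl
      (fun d (p : Int × String) => d.modify p.2 [] (fun l => l ++ [p.1])) PySem.Dict.empty).keys
      = PySem.List.dedup words := by
    rw [PySem.Dict.keys_foldl_modify_key (PySem.List.enumerate words)
      (fun (p : Int × String) => p.2) [] (fun _ p l => l ++ [p.1]) PySem.Dict.empty]
    simp [PySem.List.map_snd_enumerate, PySem.Set.update, PySem.List.dedup_eq_ofList,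
      PySem.Set.ofList_eq_foldl, PySem.Dict.keys_empty]
  rw [hkeys]
  apply List.map_congr_left
  intro w hw
  congr 1
  -- swap the enumerate pairs so the grouping-loop lemma getD_foldl_modify_append applies
  have hswap : (PySem.List.enumerate words).foldl
      (fun d (p : Int × String) => d.modify p.2 [] (fun l => l ++ [p.1])) PySem.Dict.empty
      = ((PySem.List.enumerate words).map Prod.swap).foldl
        (fun d (p : String × Int) => d.modify p.1 [] (fun l => l ++ [p.2])) PySem.Dict.empty := by
    rw [List.foldl_map]
    exact PySem.List.foldl_congr_mem _ _ _ _ (fun acc x _ => by simp)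
  rw [hswap, PySem.Dict.getD_foldl_modify_append]
  simp [List.filter_map, List.map_map, Function.comp_def]

-- ===== VERDICT (by name: the statement is the Claim_ definition above) =====
theorem locate_all_words_spec : Claim_equal_locate_all_words := by
  intro words _
  exact locate_all_words_eq_alt words
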